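-- pv_equiv track=rewrite | github.com/makzzz1986/weather_bot | weatherbot/core.py | lent
-- ===== SOURCE A (Python) =====
-- def lent(string):     # get string's length without html tags
--     tag = False
--     counter = 0
--     for ch in string:
--         if ch == '<':
--             tag = True
--         elif ch == '>':
--             tag = False
--         else:
--             if tag == False:
--                 counter += 1
--     return counter
-- ===== SOURCE B (Python) =====
-- def lent(string):
--     parts = string.split('<')
--     total = sum(1 for ch in parts[0] if ch != '>')
--     for seg in parts[1:]:
--         _, sep, rest = seg.partition('>')
--         if sep:
--             total += sum(1 for ch in rest if ch != '>')
--     return total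
-- ===== Notes on version B (the rewrite author's own statement) =====
-- stated objective: alternative
-- what changed: Replaces A's per-character tag/outside boolean state machine with a split-on-'<' decomposition: count non-'>' chars of the first segment, and for each later segment count non-'>' chars after its first '>' (0 if unterminated).
import Mathlib
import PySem

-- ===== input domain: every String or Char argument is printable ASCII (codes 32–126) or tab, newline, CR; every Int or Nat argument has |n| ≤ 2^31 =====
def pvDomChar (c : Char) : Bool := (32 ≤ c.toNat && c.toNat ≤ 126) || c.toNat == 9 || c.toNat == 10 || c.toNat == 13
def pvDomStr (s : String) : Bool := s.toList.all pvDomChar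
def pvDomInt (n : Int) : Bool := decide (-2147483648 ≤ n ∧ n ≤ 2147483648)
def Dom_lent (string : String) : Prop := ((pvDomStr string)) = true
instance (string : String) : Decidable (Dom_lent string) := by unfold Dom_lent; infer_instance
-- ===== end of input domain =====

-- B replaces A's per-character tag/outside state machine by a split-on-'<' decomposition; objective: alternative.

-- ===== PORT A =====
-- A's loop: state (tag, counter), one step per character.
def lentLoop : List Char → Bool → Int → Int
  | [], _, counter => counter
  | ch :: t, tag, counter =>
    if ch = '<' then lentLoop t true counter
    else if ch = '>' then lentLoop t false counter
    else if tag = false then lentLoop t tag (counter + 1)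
    else lentLoop t tag counter

def lent (string : String) : Int := lentLoop string.toList false 0

-- ===== PORT B =====
-- sum(1 for ch in part if ch != '>')
def countNonGt (l : List Char) : Int := ((l.filter (fun c => c ≠ '>')).length : Int)

-- string.split('<') : first segment and the remaining segments
def splitLT : List Char → List Char × List (List Char)
  | [] => ([], [])
  | c :: t =>
    let (p, r) := splitLT t
    if c = '<' then ([], p :: r) else (c :: p, r)

-- seg.partition('>') : the part after the first '>', if any
def afterGt : List Char → Option (List Char)
  | [] => none
  | c :: t => if c = '>' then some t else afterGt t

def segCount (seg : List Char) : Int :=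
  match afterGt seg with
  | none => 0
  | some rest => countNonGt rest

def lent_alt (string : String) : Int :=
  let (p, r) := splitLT string.toList
  countNonGt p + (r.map segCount).sum

-- ===== PRECONDITION & SPEC =====
def Spec_lent (string : String) (out : Int) : Prop := out = lent_alt string
instance (string : String) (out : Int) : Decidable (Spec_lent string out) := by unfold Spec_lent; infer_instance

-- ===== CLAIM (what is proved, stated in full; the proofs are below) =====
def Claim_equal_lent : Prop := ∀ (string : String), Dom_lent string → Spec_lent string (lent string)

-- ===== LEMMAS AND PROOFS =====
-- Characterisation of A's state machine as two mutually recursive counters.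
mutual
def outF : List Char → Int
  | [] => 0
  | c :: t => if c = '<' then inF t else if c = '>' then outF t else 1 + outF t
def inF : List Char → Int
  | [] => 0
  | c :: t => if c = '<' then inF t else if c = '>' then outF t else inF t
end

theorem lentLoop_eq (l : List Char) : ∀ (tag : Bool) (counter : Int),
    lentLoop l tag counter = counter + (if tag then inF l else outF l) := by
  induction l with
  | nil => intro tag counter; cases tag <;> simp [lentLoop, outF, inF]
  | cons c t ih =>
    intro tag counter
    by_cases h1 : c = '<'
    · cases tag <;> simp [lentLoop, outF, inF, h1, ih]
    · by_cases h2 : c = '>'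
      · cases tag <;> simp [lentLoop, outF, inF, h2, ih]
      · cases tag <;> simp [lentLoop, outF, inF, h1, h2, ih] <;> ring

theorem state_eq_split (l : List Char) :
    outF l = countNonGt (splitLT l).1 + ((splitLT l).2.map segCount).sum ∧
    inF l = (((splitLT l).1 :: (splitLT l).2).map segCount).sum := by
  induction l with
  | nil => simp [outF, inF, splitLT, countNonGt, segCount, afterGt]
  | cons c t ih =>
    obtain ⟨ih1, ih2⟩ := ih
    by_cases h1 : c = '<'
    · simp [outF, inF, splitLT, h1, ih2, countNonGt, segCount, afterGt]
    · by_cases h2 : c = '>'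
      · constructor
        · simp [outF, splitLT, h2, ih1, countNonGt]
        · simp [inF, splitLT, h2, ih1, segCount, afterGt]
      · constructor
        · simp [outF, splitLT, h1, h2, ih1, countNonGt]; ring
        · simp [inF, splitLT, h1, h2, ih2, segCount, afterGt]

-- ===== VERDICT (by name: the statement is the Claim_ definition above) =====
theorem lent_spec : Claim_equal_lent := by
  intro s _
  unfold Spec_lent lent lent_alt
  rw [lentLoop_eq]
  simpa using (state_eq_split s.toList).1
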